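-- pv_equiv track=rewrite | github.com/NBNEORIGIN/signmakerv2 | generate_etsy_csv_lister.py | convert_keywords_to_tags
-- ===== SOURCE A (Python) =====
-- def convert_keywords_to_tags(keywords: str) -> str:
--     """
--     Convert Amazon keywords to Etsy tags (max 13 tags, each max 20 chars).
--     """
--     if not keywords:
--         return ""
--
--     # Split by spaces and common separators
--     words = keywords.replace(",", " ").split()
--
--     # Build tags, combining short words
--     tags = []
--     current_tag = ""
--
--     for word in words:
--         word = word.strip()
--         if not word:
--             continue
--
--         if len(current_tag) == 0:
--             current_tag = word
--         elif len(current_tag) + 1 + len(word) <= 20: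
--             current_tag += " " + word
--         else:
--             if current_tag:
--                 tags.append(current_tag[:20])
--             current_tag = word
--
--         if len(tags) >= 13:
--             break
--
--     if current_tag and len(tags) < 13:
--         tags.append(current_tag[:20])
--
--     return ",".join(tags[:13])
-- ===== SOURCE B (Python) =====
-- def convert_keywords_to_tags(keywords: str) -> str:
--     """
--     Convert Amazon keywords to Etsy tags (max 13 tags, each max 20 chars).
--     Two-phase: group words greedily, then format the first 13 groups.
--     """
--     words = keywords.replace(",", " ").split()
--
--     def group(ws):
--         if not ws:
--             return []
--         g = [ws[0]]
--         n = len(ws[0])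
--         i = 1
--         while i < len(ws) and n + 1 + len(ws[i]) <= 20:
--             g.append(ws[i])
--             n += 1 + len(ws[i])
--             i += 1
--         return [g] + group(ws[i:])
--
--     return ",".join(" ".join(g)[:20] for g in group(words)[:13])
-- ===== Notes on version B (the rewrite author's own statement) =====
-- stated objective: alternative
-- what changed: Replaces A's single stateful loop (current_tag accumulator with in-loop flush, break at 13 tags, and a trailing flush) by a two-phase decomposition: recursively split the word list into maximal groups whose space-joined length stays <= 20, then format the first 13 groups with ' '.join(g)[:20] and comma-join them.
import Mathlib
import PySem

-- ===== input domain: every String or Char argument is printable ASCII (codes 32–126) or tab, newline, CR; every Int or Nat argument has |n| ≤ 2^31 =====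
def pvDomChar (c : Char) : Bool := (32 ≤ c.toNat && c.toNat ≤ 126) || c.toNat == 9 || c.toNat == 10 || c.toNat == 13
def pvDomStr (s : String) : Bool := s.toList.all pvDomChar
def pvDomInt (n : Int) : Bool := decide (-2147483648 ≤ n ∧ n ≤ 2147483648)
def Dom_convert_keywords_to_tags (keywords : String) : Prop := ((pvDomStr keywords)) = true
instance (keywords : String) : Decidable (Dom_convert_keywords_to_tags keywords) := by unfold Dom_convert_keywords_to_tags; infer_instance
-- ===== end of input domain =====

-- B replaces A's single stateful loop (current_tag accumulator + break + trailing flush) by a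
-- two-phase decomposition: recursively split the word list into maximal ≤20-char groups, then
-- format the first 13 groups (objective: alternative; same cost).

-- ===== PORT A =====
-- A's for-loop over words with state (tags, current_tag); the `break` returns the tags as they
-- stand (the trailing flush is then skipped since len(tags) >= 13).
def convertALoop : List (List Char) → List (List Char) → List Char → List (List Char)
  | [], tags, cur =>
      -- `if current_tag and len(tags) < 13: tags.append(current_tag[:20])`
      if cur ≠ [] ∧ tags.length < 13 then tags ++ [PySem.List.slice cur none (some 20)] else tags
  | w :: ws, tags, cur =>
      let w' := PySem.Chars.strip w
      if w' = [] then convertALoop ws tags cur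
      else
        let p : List (List Char) × List Char :=
          if cur.length = 0 then (tags, w')
          else if cur.length + 1 + w'.length ≤ 20 then (tags, cur ++ ' ' :: w')
          else ((if cur ≠ [] then tags ++ [PySem.List.slice cur none (some 20)] else tags), w')
        if 13 ≤ p.1.length then p.1 else convertALoop ws p.1 p.2

def convert_keywords_to_tags (keywords : String) : String :=
  if keywords.toList = [] then ""
  else
    String.ofList (PySem.Chars.join [',']
      ((convertALoop (PySem.Chars.split₀ (PySem.Chars.replace keywords.toList [','] [' '])) [] []).take 13))

-- ===== PORT B =====
-- Source B's inner while loop: absorb further words while the running joined length stays ≤ 20;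
-- returns (absorbed words, remaining words).
def convertBTakeGroup : List (List Char) → Nat → List (List Char) × List (List Char)
  | [], _ => ([], [])
  | w :: ws, n =>
      if n + 1 + w.length ≤ 20 then
        let r := convertBTakeGroup ws (n + 1 + w.length)
        (w :: r.1, r.2)
      else ([], w :: ws)

theorem convertBTakeGroup_snd_length : ∀ (ws : List (List Char)) (n : Nat),
    (convertBTakeGroup ws n).2.length ≤ ws.length := by
  intro ws
  induction ws with
  | nil => intro n; simp [convertBTakeGroup]
  | cons w ws ih =>
      intro n
      simp only [convertBTakeGroup]
      split
      · exact Nat.le_succ_of_le (ih _)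
      · simp

-- Source B's `group`: one maximal group, then recurse on the rest.
def convertBGroup : List (List Char) → List (List (List Char))
  | [] => []
  | w :: ws =>
      let r := convertBTakeGroup ws w.length
      (w :: r.1) :: convertBGroup r.2
termination_by ws => ws.length
decreasing_by
  have := convertBTakeGroup_snd_length ws w.length
  simpa using Nat.lt_succ_of_le this

-- `' '.join(g)[:20]`
def convertBFmt (g : List (List Char)) : List Char :=
  PySem.List.slice (PySem.Chars.join [' '] g) none (some 20)

def convert_keywords_to_tags_alt (keywords : String) : String :=
  String.ofList (PySem.Chars.join [',']
    (((convertBGroup (PySem.Chars.split₀ (PySem.Chars.replace keywords.toList [','] [' ']))).take 13).map convertBFmt))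

-- ===== PRECONDITION & SPEC =====
def Spec_convert_keywords_to_tags (keywords : String) (out : String) : Prop := out = convert_keywords_to_tags_alt keywords
instance (keywords : String) (out : String) : Decidable (Spec_convert_keywords_to_tags keywords out) := by unfold Spec_convert_keywords_to_tags; infer_instance

-- ===== CLAIM (what is proved, stated in full; the proofs are below) =====
def Claim_equal_convert_keywords_to_tags : Prop := ∀ (keywords : String), Dom_convert_keywords_to_tags keywords → Spec_convert_keywords_to_tags keywords (convert_keywords_to_tags keywords)

-- ===== LEMMAS AND PROOFS =====

-- Common reference: the completed tag grown from `cur` (and the remaining words).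
def tagOf : List Char → List (List Char) → List Char × List (List Char)
  | cur, [] => (cur, [])
  | cur, w :: ws =>
      if cur.length + 1 + w.length ≤ 20 then tagOf (cur ++ ' ' :: w) ws else (cur, w :: ws)

theorem tagOf_snd_length : ∀ (ws : List (List Char)) (cur : List Char),
    (tagOf cur ws).2.length ≤ ws.length := by
  intro ws
  induction ws with
  | nil => intro cur; simp [tagOf]
  | cons w ws ih =>
      intro cur
      simp only [tagOf]
      split
      · exact Nat.le_succ_of_le (ih _)
      · simp

-- The full (untruncated-count) list of tags produced from a word list.
def specTags : List (List Char) → List (List Char)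
  | [] => []
  | w :: ws => (tagOf w ws).1.take 20 :: specTags (tagOf w ws).2
termination_by ws => ws.length
decreasing_by
  have := tagOf_snd_length ws w
  simpa using Nat.lt_succ_of_le this

theorem slice20_eq_take (cs : List Char) :
    PySem.List.slice cs none (some 20) = cs.take 20 := by
  have := PySem.List.slice_to cs (b := 20) (by norm_num)
  simpa using this

-- B side: takeGroup matches tagOf.
theorem tagOf_eq_takeGroup : ∀ (ws : List (List Char)) (cur : List Char),
    tagOf cur ws =
      (PySem.Chars.join [' '] (cur :: (convertBTakeGroup ws cur.length).1),
       (convertBTakeGroup ws cur.length).2) := by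
  intro ws
  induction ws with
  | nil => intro cur; simp [tagOf, convertBTakeGroup, PySem.Chars.join_singleton]
  | cons w ws ih =>
      intro cur
      simp only [tagOf, convertBTakeGroup]
      by_cases h : cur.length + 1 + w.length ≤ 20
      · rw [if_pos h, if_pos h]
        have hlen : (cur ++ ' ' :: w).length = cur.length + 1 + w.length := by
          simp [List.length_append]; omega
        rw [ih (cur ++ ' ' :: w), hlen]
        refine Prod.ext ?_ rfl
        cases hg : (convertBTakeGroup ws (cur.length + 1 + w.length)).1 with
        | nil => simp [PySem.Chars.join_singleton, PySem.Chars.join_cons_cons]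
        | cons q rest =>
            simp [PySem.Chars.join_cons_cons]
      · rw [if_neg h, if_neg h]
        simp [PySem.Chars.join_singleton]

theorem map_fmt_group_eq_specTags : ∀ (ws : List (List Char)),
    (convertBGroup ws).map convertBFmt = specTags ws := by
  intro ws
  induction ws using convertBGroup.induct with
  | case1 => simp [convertBGroup, specTags]
  | case2 w ws r ih =>
      rw [convertBGroup]
      simp only [List.map_cons]
      rw [specTags]
      rw [tagOf_eq_takeGroup ws w]
      simp only [convertBFmt]
      rw [slice20_eq_take, ih]

-- split() tokens are nonempty and whitespace-free.
theorem split₀_go_clean : ∀ (s cur : List Char) (acc : List (List Char)) (w : List Char),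
    (∀ c ∈ cur, PySem.Chars.isspace c = false) →
    w ∈ PySem.Chars.split₀.go s cur acc →
    w ∈ acc ∨ (w ≠ [] ∧ ∀ c ∈ w, PySem.Chars.isspace c = false) := by
  intro s
  induction s with
  | nil =>
      intro cur acc w hcur hw
      simp only [PySem.Chars.split₀.go] at hw
      split at hw
      · simp at hw; exact Or.inl hw
      · rename_i hne
        rw [List.mem_reverse] at hw
        rcases List.mem_cons.1 hw with h | h
        · subst h
          refine Or.inr ⟨by simpa using hne, ?_⟩
          intro c hc; exact hcur c (List.mem_reverse.1 hc)
        · exact Or.inl h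
  | cons c rest ih =>
      intro cur acc w hcur hw
      simp only [PySem.Chars.split₀.go] at hw
      split at hw
      · split at hw
        · exact ih [] acc w (by simp) hw
        · rename_i hne
          rcases ih [] (cur.reverse :: acc) w (by simp) hw with h | h
          · rcases List.mem_cons.1 h with h' | h'
            · subst h'
              refine Or.inr ⟨by simpa using hne, ?_⟩
              intro x hx; exact hcur x (List.mem_reverse.1 hx)
            · exact Or.inl h'
          · exact Or.inr h
      · rename_i hsp
        refine ih (c :: cur) acc w ?_ hw
        intro x hx
        rcases List.mem_cons.1 hx with h' | h'
        · subst h'; simpa using hsp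
        · exact hcur x h'

theorem split₀_clean (s w : List Char) (hw : w ∈ PySem.Chars.split₀ s) :
    w ≠ [] ∧ ∀ c ∈ w, PySem.Chars.isspace c = false := by
  rcases split₀_go_clean s [] [] w (by simp) hw with h | h
  · simp at h
  · exact h

theorem strip_clean (w : List Char) (h : ∀ c ∈ w, PySem.Chars.isspace c = false) :
    PySem.Chars.strip w = w := by
  have hl : PySem.Chars.lstrip w = w := by
    simp only [PySem.Chars.lstrip]
    rw [List.dropWhile_eq_self_iff]
    intro hl
    simpa using h w[0] (List.getElem_mem hl)
  have hr : PySem.Chars.rstrip w = w := by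
    simp only [PySem.Chars.rstrip]
    have : List.dropWhile PySem.Chars.isspace w.reverse = w.reverse := by
      rw [List.dropWhile_eq_self_iff]
      intro hl
      have : w.reverse[0] ∈ w := by
        exact List.mem_reverse.1 (List.getElem_mem hl)
      simpa using h _ this
    rw [this, List.reverse_reverse]
  rw [PySem.Chars.strip, hl, hr]

-- A's loop, from a nonempty current tag with fewer than 13 tags collected, produces exactly the
-- reference tags (cut off at 13).
theorem convertALoop_eq_specTags : ∀ (ws : List (List Char)),
    (∀ w ∈ ws, w ≠ [] ∧ PySem.Chars.strip w = w) →
    ∀ (cur : List Char) (tags : List (List Char)), cur ≠ [] → tags.length < 13 →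
    convertALoop ws tags cur =
      (tags ++ ((tagOf cur ws).1.take 20 :: specTags (tagOf cur ws).2)).take 13 := by
  intro ws
  induction ws with
  | nil =>
      intro _ cur tags hcur htags
      simp only [convertALoop, tagOf, specTags]
      rw [if_pos ⟨hcur, htags⟩, slice20_eq_take]
      exact (List.take_of_length_le (by simp; omega)).symm
  | cons w ws ih =>
      intro hclean cur tags hcur htags
      obtain ⟨hw, hstrip⟩ := hclean w (List.mem_cons_self ..)
      have hclean' : ∀ w ∈ ws, w ≠ [] ∧ PySem.Chars.strip w = w := fun x hx =>
        hclean x (List.mem_cons_of_mem _ hx)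
      simp only [convertALoop, hstrip, if_neg hw]
      have hcl : ¬ cur.length = 0 := by simpa [List.length_eq_zero_iff] using hcur
      rw [if_neg hcl]
      by_cases hfit : cur.length + 1 + w.length ≤ 20
      · rw [if_pos hfit]
        simp only
        rw [if_neg (by omega)]
        rw [ih hclean' (cur ++ ' ' :: w) tags (by simp) htags]
        simp only [tagOf, if_pos hfit]
      · rw [if_neg hfit]
        simp only [if_pos hcur]
        simp only [tagOf, if_neg hfit, specTags]
        rw [slice20_eq_take]
        by_cases hbrk : 13 ≤ (tags ++ [cur.take 20]).length
        · rw [if_pos hbrk]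
          have h13 : (tags ++ [cur.take 20]).length = 13 := by simp at hbrk ⊢; omega
          rw [show tags ++ List.take 20 cur :: (tagOf w ws).1.take 20 :: specTags (tagOf w ws).2
                = (tags ++ [cur.take 20]) ++ ((tagOf w ws).1.take 20 :: specTags (tagOf w ws).2)
              by simp]
          rw [← h13, List.take_left]
        · rw [if_neg hbrk]
          rw [ih hclean' w (tags ++ [cur.take 20]) hw (by simp at hbrk ⊢; omega)]
          simp

-- ===== VERDICT (by name: the statement is the Claim_ definition above) =====
theorem convert_keywords_to_tags_spec : Claim_equal_convert_keywords_to_tags := by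
  unfold Claim_equal_convert_keywords_to_tags Spec_convert_keywords_to_tags
  intro keywords _
  unfold convert_keywords_to_tags convert_keywords_to_tags_alt
  by_cases hk : keywords.toList = []
  · rw [if_pos hk, hk]
    rw [show PySem.Chars.split₀ (PySem.Chars.replace [] [','] [' ']) = [] from rfl]
    rw [show convertBGroup [] = [] from by rw [convertBGroup]]
    rfl
  · rw [if_neg hk]
    have hmain : ∀ (ws : List (List Char)), (∀ w ∈ ws, w ≠ [] ∧ PySem.Chars.strip w = w) →
        (convertALoop ws [] []).take 13 = ((convertBGroup ws).take 13).map convertBFmt := by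
      intro ws hclean
      rw [List.map_take, map_fmt_group_eq_specTags]
      cases ws with
      | nil => simp [convertALoop, specTags]
      | cons w ws' =>
          obtain ⟨hw, hstrip⟩ := hclean w (List.mem_cons_self ..)
          have hclean' : ∀ x ∈ ws', x ≠ [] ∧ PySem.Chars.strip x = x := fun x hx =>
            hclean x (List.mem_cons_of_mem _ hx)
          rw [show convertALoop (w :: ws') [] [] = convertALoop ws' [] w from by
            simp [convertALoop, hstrip, hw]]
          rw [convertALoop_eq_specTags ws' hclean' w [] hw (by simp)]
          rw [specTags]
          simp [List.take_take]
    have hclean : ∀ w ∈ PySem.Chars.split₀ (PySem.Chars.replace keywords.toList [','] [' ']),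
        w ≠ [] ∧ PySem.Chars.strip w = w := by
      intro w hw
      obtain ⟨h1, h2⟩ := split₀_clean _ w hw
      exact ⟨h1, strip_clean w h2⟩
    exact congrArg String.ofList (congrArg (PySem.Chars.join [',']) (hmain _ hclean))
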